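-- pv_equiv track=rewrite | github.com/martincdh/LeetcodePython | convert int to sum of 2 non-zero int solved.py | getNoZeroIntegers
-- ===== SOURCE A (Python) =====
-- def getNoZeroIntegers(n):
--     for i in range(n):
--         if '0' in str(i):
--             continue
--         else:
--             for j in range(n):
--                 if '0' in str(j):
--                     continue
--                 else:
--                     if i+j == n and i!=0 and j!=0:
--                         return [i,j]
--                         break
-- ===== SOURCE B (Python) =====
-- def getNoZeroIntegers(n):
--     # single pass: for each candidate i, its partner is forced to be n - i
--     for i in range(1, n):
--         if '0' not in str(i) and '0' not in str(n - i):
--             return [i, n - i]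
-- ===== Notes on version B (the rewrite author's own statement) =====
-- stated objective: faster
-- what changed: Replaces A's nested scan over all pairs (i,j) with a single loop over i that checks the forced partner n-i directly, since i+j==n determines j.
-- outside the precondition, e.g. on getNoZeroIntegers(1): A returns None, B returns None
import Mathlib
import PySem

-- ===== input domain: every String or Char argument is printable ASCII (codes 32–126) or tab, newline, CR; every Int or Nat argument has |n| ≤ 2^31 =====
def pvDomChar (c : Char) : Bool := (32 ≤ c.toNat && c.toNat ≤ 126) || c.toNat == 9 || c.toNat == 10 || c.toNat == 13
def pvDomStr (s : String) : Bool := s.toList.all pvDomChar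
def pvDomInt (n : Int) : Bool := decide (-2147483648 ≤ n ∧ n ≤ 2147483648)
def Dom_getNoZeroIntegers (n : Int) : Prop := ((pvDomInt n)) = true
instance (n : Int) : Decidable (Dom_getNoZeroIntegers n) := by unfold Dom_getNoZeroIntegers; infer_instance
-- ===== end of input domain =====

-- B replaces A's nested scan over all pairs (i, j) with a single loop over i checking the
-- forced partner n - i: faster (asymptotically fewer iterations), same return value on Pre_.

-- ===== PORT A =====
-- '0' in str(x)
def pvHasZero (x : Int) : Bool := PySem.Str.isIn "0" (PySem.Int.toStr x)

-- the inner 'for j in range(n): …' loop of A (early return = Option)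
def pvInnerA (n i : Int) : List Int → Option (List Int)
  | [] => none
  | j :: rest =>
    if pvHasZero j then pvInnerA n i rest
    else if i + j = n ∧ i ≠ 0 ∧ j ≠ 0 then some [i, j]
    else pvInnerA n i rest

-- the outer 'for i in range(n): …' loop of A
def pvOuterA (n : Int) : List Int → Option (List Int)
  | [] => none
  | i :: rest =>
    if pvHasZero i then pvOuterA n rest
    else
      match pvInnerA n i (PySem.List.pyRange 0 n 1) with
      | some r => some r
      | none => pvOuterA n rest

def getNoZeroIntegers (n : Int) : List Int :=
  (pvOuterA n (PySem.List.pyRange 0 n 1)).getD []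

-- ===== PORT B =====
-- the single 'for i in range(1, n): …' loop of B
def pvLoopB (n : Int) : List Int → Option (List Int)
  | [] => none
  | i :: rest =>
    if !pvHasZero i && !pvHasZero (n - i) then some [i, n - i]
    else pvLoopB n rest

def getNoZeroIntegers_alt (n : Int) : List Int :=
  (pvLoopB n (PySem.List.pyRange 1 n 1)).getD []

-- ===== PRECONDITION & SPEC =====
-- Pre_ excludes n < 2, where the Python A falls off both loops and returns None (no List value);
-- for every n ≥ 2 a zero-free split exists and A returns it.
def Pre_getNoZeroIntegers (n : Int) : Prop := 2 ≤ n
instance (n : Int) : Decidable (Pre_getNoZeroIntegers n) := by unfold Pre_getNoZeroIntegers; infer_instance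

def pvWitness_getNoZeroIntegers : Int := (11)

def Spec_getNoZeroIntegers (n : Int) (out : List Int) : Prop := out = getNoZeroIntegers_alt n
instance (n : Int) (out : List Int) : Decidable (Spec_getNoZeroIntegers n out) := by unfold Spec_getNoZeroIntegers; infer_instance

-- ===== CLAIM (what is proved, stated in full; the proofs are below) =====
def Claim_equal_getNoZeroIntegers : Prop := ∀ (n : Int), Dom_getNoZeroIntegers n → Pre_getNoZeroIntegers n → Spec_getNoZeroIntegers n (getNoZeroIntegers n)

-- ===== LEMMAS AND PROOFS =====

-- A's inner loop: only j = n - i can fire, so its result is decided by a single membership test.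
theorem pvInnerA_eq (n i : Int) (L : List Int) :
    pvInnerA n i L =
      if L.any (fun j => !pvHasZero j && decide (i + j = n ∧ i ≠ 0 ∧ j ≠ 0)) then
        some [i, n - i]
      else none := by
  induction L with
  | nil => simp [pvInnerA]
  | cons j rest ih =>
    rw [pvInnerA]
    by_cases hz : pvHasZero j
    · have hfj : (!pvHasZero j && decide (i + j = n ∧ i ≠ 0 ∧ j ≠ 0)) = false := by simp [hz]
      rw [if_pos hz, ih, List.any_cons, hfj, Bool.false_or]
    · by_cases hc : i + j = n ∧ i ≠ 0 ∧ j ≠ 0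
      · have hj : j = n - i := by omega
        have hany : ((j :: rest).any fun j => !pvHasZero j && decide (i + j = n ∧ i ≠ 0 ∧ j ≠ 0)) = true := by
          rw [List.any_cons]
          simp [hz, hc]
        rw [if_neg hz, if_pos hc, if_pos hany, hj]
      · have hfj : (!pvHasZero j && decide (i + j = n ∧ i ≠ 0 ∧ j ≠ 0)) = false := by simp [hc]
        rw [if_neg hz, if_neg hc, ih, List.any_cons, hfj, Bool.false_or]

-- For 1 ≤ i < n, A's inner loop over range(n) succeeds iff n - i is zero-free.
theorem pvInnerA_range (n i : Int) (h1 : 1 ≤ i) (h2 : i < n) :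
    pvInnerA n i (PySem.List.pyRange 0 n 1) =
      if pvHasZero (n - i) then none else some [i, n - i] := by
  rw [pvInnerA_eq]
  by_cases hz : pvHasZero (n - i)
  · have hfalse : (PySem.List.pyRange 0 n 1).any
        (fun j => !pvHasZero j && decide (i + j = n ∧ i ≠ 0 ∧ j ≠ 0)) = false := by
      rw [List.any_eq_false]
      intro j hj
      rw [PySem.List.mem_pyRange_one] at hj
      by_cases hji : j = n - i
      · subst hji; simp [hz]
      · have hnc : ¬ (i + j = n ∧ i ≠ 0 ∧ j ≠ 0) := fun h => hji (by omega)
        simp [hnc]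
    rw [hfalse, if_pos hz]
    simp
  · have htrue : (PySem.List.pyRange 0 n 1).any
        (fun j => !pvHasZero j && decide (i + j = n ∧ i ≠ 0 ∧ j ≠ 0)) = true := by
      rw [List.any_eq_true]
      refine ⟨n - i, by rw [PySem.List.mem_pyRange_one]; omega, ?_⟩
      simp only [Bool.not_eq_true', Bool.and_eq_true, decide_eq_true_eq]
      exact ⟨by simpa using hz, by omega, by omega, by omega⟩
    rw [htrue, if_neg hz]
    simp

-- On any list of indices in [1, n), A's outer loop and B's loop agree.
theorem pvOuter_eq_loopB (n : Int) (L : List Int) (hL : ∀ i ∈ L, 1 ≤ i ∧ i < n) :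
    pvOuterA n L = pvLoopB n L := by
  induction L with
  | nil => rfl
  | cons i rest ih =>
    have hi := hL i (by simp)
    have hrest : ∀ x ∈ rest, 1 ≤ x ∧ x < n := fun x hx => hL x (by simp [hx])
    by_cases hz : pvHasZero i
    · simp [pvOuterA, pvLoopB, hz, ih hrest]
    · rw [pvOuterA, pvLoopB]
      rw [pvInnerA_range n i hi.1 hi.2]
      by_cases hz2 : pvHasZero (n - i)
      · simp [hz, hz2, ih hrest]
      · simp [hz, hz2]

theorem pvHasZero_zero : pvHasZero 0 = true := by decide

-- ===== VERDICT (by name: the statement is the Claim_ definition above) =====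
theorem getNoZeroIntegers_spec : Claim_equal_getNoZeroIntegers := by
  intro n _ hpre
  have hn : (2 : Int) ≤ n := hpre
  unfold Spec_getNoZeroIntegers getNoZeroIntegers getNoZeroIntegers_alt
  have hsplit : PySem.List.pyRange 0 n 1 = 0 :: PySem.List.pyRange 1 n 1 := by
    simpa using PySem.List.pyRange_one_cons (a := 0) (b := n) (by omega)
  rw [hsplit, pvOuterA, if_pos pvHasZero_zero,
    pvOuter_eq_loopB n _ (fun i hi => by
      rw [PySem.List.mem_pyRange_one] at hi; omega)]
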